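-- pv_equiv track=rewrite | github.com/Harshal-18/web_scraping | scrape_gujrera_ahmedabad.py | _order_columns
-- ===== SOURCE A (Python) =====
-- DESIRED_COLUMNS = [
--     'Project Name',
--     'RERA Reg. No.',
--     'Project Address',
--     'Taluka',
--     'District',
--     'State',
--     'Project Type',
--     'About Property',
--     'Project Start Date',
--     'Project End Date',
--     'Project Land Area',
--     'Total Open Area',
--     'Total Covered Area',
--     'Carpet Area of Units (Range)',
--     'Plan Passing Authority',
--     'Redevelopment Project',
--     'Affordable Housing',
--     'Amenities',
--     'Unit Type',
--     'Block',
--     'Total Units',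
--     'Available Units',
--     'Total No. of Towers/Blocks',
--     'Promoter Name',
--     'Promoter Type',
--     'Contact',
--     'Email Id',
--     'Address',
--     'Office Address',
--     # Partner columns (cell value will contain: Name, Mobile, Email Id)
--     'Partner 1', 'Partner 2', 'Partner 3', 'Partner 4', 'Partner 5',
--     'Project Estimated Cost (Rs.)',
--     'Percentage Loan Against Project Estimated Cost',
--     'Total Quarterly Compliance Required',
--     'Total Complied Quarters',
--     'Total Quarterly Compliance Defaulted',
--     'Total Annual Compliance Required',
--     'Total Complied Annual Compliance',
--     'Total Annual Compliance Defaulted',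
--     'Project Status',
--     'Website',
--     'Approved Date',
-- ]
--
-- DISALLOWED_COLUMNS = {
--     'Booked Units as on',
--     'Un-booked Units as on',
--     # Legacy/duplicate partner columns (name-only) to be dropped when present
--     'Partner 1 Name', 'Partner 2 Name', 'Partner 3 Name', 'Partner 4 Name', 'Partner 5 Name',
-- }
--
-- def _order_columns(existing_cols, incoming_cols):
--     """Return a unified column list where DESIRED_COLUMNS appear first in the given order,
--     followed by any additional columns preserving their discovery order."""
--     seen = set()
--     union = []
--     for c in DESIRED_COLUMNS:
--         if c in existing_cols or c in incoming_cols: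
--             if c not in seen:
--                 union.append(c); seen.add(c)
--     for c in list(existing_cols) + [c for c in incoming_cols if c not in existing_cols]:
--         if c in DISALLOWED_COLUMNS:
--             continue
--         if c not in seen:
--             union.append(c); seen.add(c)
--     return union
-- ===== SOURCE B (Python) =====
-- DESIRED_COLUMNS = [
--     'Project Name',
--     'RERA Reg. No.',
--     'Project Address',
--     'Taluka',
--     'District',
--     'State',
--     'Project Type',
--     'About Property',
--     'Project Start Date',
--     'Project End Date',
--     'Project Land Area',
--     'Total Open Area',
--     'Total Covered Area',
--     'Carpet Area of Units (Range)',
--     'Plan Passing Authority',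
--     'Redevelopment Project',
--     'Affordable Housing',
--     'Amenities',
--     'Unit Type',
--     'Block',
--     'Total Units',
--     'Available Units',
--     'Total No. of Towers/Blocks',
--     'Promoter Name',
--     'Promoter Type',
--     'Contact',
--     'Email Id',
--     'Address',
--     'Office Address',
--     # Partner columns (cell value will contain: Name, Mobile, Email Id)
--     'Partner 1', 'Partner 2', 'Partner 3', 'Partner 4', 'Partner 5',
--     'Project Estimated Cost (Rs.)',
--     'Percentage Loan Against Project Estimated Cost',
--     'Total Quarterly Compliance Required',
--     'Total Complied Quarters',
--     'Total Quarterly Compliance Defaulted',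
--     'Total Annual Compliance Required',
--     'Total Complied Annual Compliance',
--     'Total Annual Compliance Defaulted',
--     'Project Status',
--     'Website',
--     'Approved Date',
-- ]
--
-- DISALLOWED_COLUMNS = {
--     'Booked Units as on',
--     'Un-booked Units as on',
--     # Legacy/duplicate partner columns (name-only) to be dropped when present
--     'Partner 1 Name', 'Partner 2 Name', 'Partner 3 Name', 'Partner 4 Name', 'Partner 5 Name',
-- }
--
--
-- def _order_columns(existing_cols, incoming_cols):
--     """Unified column list: desired columns first (in DESIRED order), then extras in discovery order."""
--     base = len(DESIRED_COLUMNS)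
--     candidates = [c for c in dict.fromkeys(list(existing_cols) + list(incoming_cols))
--                   if c not in DISALLOWED_COLUMNS]
--     def rank(ic):
--         i, c = ic
--         return DESIRED_COLUMNS.index(c) if c in DESIRED_COLUMNS else base + i
--     return [c for _, c in sorted(enumerate(candidates), key=rank)]
-- ===== Notes on version B (the rewrite author's own statement) =====
-- stated objective: alternative
-- what changed: Replaces A's two stateful scans sharing a mutable `seen` set with: one deduped candidate list (dict.fromkeys of the concatenation, minus DISALLOWED), then a single stable sort by an integer priority (position in DESIRED_COLUMNS, else length(DESIRED)+discovery index).
import Mathlib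
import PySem

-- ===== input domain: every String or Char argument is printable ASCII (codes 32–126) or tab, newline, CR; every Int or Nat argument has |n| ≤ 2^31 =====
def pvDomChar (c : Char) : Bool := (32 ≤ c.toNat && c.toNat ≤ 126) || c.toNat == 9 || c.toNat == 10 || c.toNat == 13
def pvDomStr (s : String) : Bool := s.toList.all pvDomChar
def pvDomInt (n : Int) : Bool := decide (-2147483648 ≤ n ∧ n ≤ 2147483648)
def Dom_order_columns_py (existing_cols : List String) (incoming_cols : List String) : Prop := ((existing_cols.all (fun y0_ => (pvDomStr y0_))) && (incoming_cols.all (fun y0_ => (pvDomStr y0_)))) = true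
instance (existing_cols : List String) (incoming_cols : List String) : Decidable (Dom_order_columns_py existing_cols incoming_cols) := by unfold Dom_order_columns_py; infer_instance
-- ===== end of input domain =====

-- B replaces A's two stateful scans over a shared mutable `seen` set by one deduped
-- candidate list plus a single stable sort by an integer priority (alternative algorithm).

-- ===== PORT A =====
def desiredColumns : List String := ["Project Name", "RERA Reg. No.", "Project Address", "Taluka", "District", "State", "Project Type", "About Property", "Project Start Date", "Project End Date", "Project Land Area", "Total Open Area", "Total Covered Area", "Carpet Area of Units (Range)", "Plan Passing Authority", "Redevelopment Project", "Affordable Housing", "Amenities", "Unit Type", "Block", "Total Units", "Available Units", "Total No. of Towers/Blocks", "Promoter Name", "Promoter Type", "Contact", "Email Id", "Address", "Office Address", "Partner 1", "Partner 2", "Partner 3", "Partner 4", "Partner 5", "Project Estimated Cost (Rs.)", "Percentage Loan Against Project Estimated Cost", "Total Quarterly Compliance Required", "Total Complied Quarters", "Total Quarterly Compliance Defaulted", "Total Annual Compliance Required", "Total Complied Annual Compliance", "Total Annual Compliance Defaulted", "Project Status", "Website", "Approved Date"]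

-- Python set literal; only membership is used, so the listing order is immaterial
def disallowedColumns : PySem.Set String := PySem.Set.ofList ["Booked Units as on", "Partner 1 Name", "Partner 2 Name", "Partner 3 Name", "Partner 4 Name", "Partner 5 Name", "Un-booked Units as on"]

-- literal port of A: state (union, seen); loop 1 over DESIRED_COLUMNS, loop 2 over
-- list(existing) + [c for c in incoming if c not in existing]
def order_columns_py (existing_cols : List String) (incoming_cols : List String) : List String :=
  let st1 : List String × PySem.Set String :=
    desiredColumns.foldl (fun acc c =>
      if existing_cols.contains c || incoming_cols.contains c then
        if !(PySem.Set.contains acc.2 c) then (acc.1 ++ [c], PySem.Set.add acc.2 c) else acc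
      else acc) ([], PySem.Set.empty)
  let disc := existing_cols ++ incoming_cols.filter (fun c => !(existing_cols.contains c))
  let st2 :=
    disc.foldl (fun acc c =>
      if PySem.Set.contains disallowedColumns c then acc
      else if !(PySem.Set.contains acc.2 c) then (acc.1 ++ [c], PySem.Set.add acc.2 c) else acc) st1
  st2.1

-- ===== PORT B =====
-- literal port of Source B: dedup+filter to get candidates, then one sort of
-- enumerate(candidates) by an integer rank, then strip the indices
def order_columns_py_alt (existing_cols : List String) (incoming_cols : List String) : List String :=
  let base : Int := (desiredColumns.length : Int)
  let candidates : List String :=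
    (PySem.List.dedup (existing_cols ++ incoming_cols)).filter
      (fun c => !(PySem.Set.contains disallowedColumns c))
  let rank : Int × String → Int := fun ic =>
    if desiredColumns.contains ic.2 then (((PySem.List.index? desiredColumns ic.2).getD 0 : Nat) : Int)
    else base + ic.1
  (PySem.List.sorted (PySem.List.enumerate candidates) rank).map (fun ic => ic.2)

-- ===== PRECONDITION & SPEC =====
def Spec_order_columns_py (existing_cols : List String) (incoming_cols : List String) (out : List String) : Prop := out = order_columns_py_alt existing_cols incoming_cols
instance (existing_cols : List String) (incoming_cols : List String) (out : List String) : Decidable (Spec_order_columns_py existing_cols incoming_cols out) := by unfold Spec_order_columns_py; infer_instance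

-- ===== CLAIM (what is proved, stated in full; the proofs are below) =====
def Claim_equal_order_columns_py : Prop := ∀ (existing_cols : List String) (incoming_cols : List String), Dom_order_columns_py existing_cols incoming_cols → Spec_order_columns_py existing_cols incoming_cols (order_columns_py existing_cols incoming_cols)

-- ===== LEMMAS AND PROOFS =====

-- the common normal form both programs are shown to equal:
-- desired columns present in either input (in DESIRED order), then the remaining
-- discovered columns (first occurrences, concatenation order) minus DISALLOWED
def pvP (ex inc : List String) (c : String) : Bool := ex.contains c || inc.contains c
def pvHead (ex inc : List String) : List String := desiredColumns.filter (pvP ex inc)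
def pvCand (ex inc : List String) : List String :=
  (PySem.List.dedup (ex ++ inc)).filter (fun c => !(PySem.Set.contains disallowedColumns c))
def pvExtras (ex inc : List String) : List String :=
  (pvCand ex inc).filter (fun c => !(desiredColumns.contains c))

-- closed facts about the two constant tables
lemma pv_nodup_desired : desiredColumns.Nodup := by decide
lemma pv_disjoint : desiredColumns.all (fun c => !(PySem.Set.contains disallowedColumns c)) = true := by decide

-- ---- generic facts about foldl Set.add (the "append if unseen" loop shape) ----

-- A's loop keeps (union, seen) in lockstep: it is the guarded Set.add fold, twice
lemma pv_loop_pair (p : String → Bool) (L : List String) (u : List String) :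
    L.foldl (fun acc c =>
      if p c then
        if !(PySem.Set.contains acc.2 c) then (acc.1 ++ [c], PySem.Set.add acc.2 c) else acc
      else acc) (u, u)
    = (L.foldl (fun s c => if p c then PySem.Set.add s c else s) u,
       L.foldl (fun s c => if p c then PySem.Set.add s c else s) u) := by
  induction L generalizing u with
  | nil => rfl
  | cons c L ih =>
    simp only [List.foldl_cons]
    by_cases hp : p c
    · by_cases hc : c ∈ u
      · simpa [hp, PySem.Set.contains, PySem.Set.add, hc] using ih u
      · simpa [hp, PySem.Set.contains, PySem.Set.add, hc] using ih (u ++ [c])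
    · simpa [hp] using ih u

-- a guarded fold is a fold over the filtered list
lemma pv_foldl_guard {α β : Type} (p : α → Bool) (f : β → α → β) (L : List α) (s : β) :
    L.foldl (fun u c => if p c then f u c else u) s = (L.filter p).foldl f s := by
  rw [List.foldl_filter]

-- fold of Set.add from an arbitrary start: start, then the dedup of L minus the start
lemma pv_addAll (L : List String) (s : List String) :
    L.foldl PySem.Set.add s = s ++ (PySem.List.dedup L).filter (fun c => !(s.contains c)) := by
  induction L generalizing s with
  | nil => simp [PySem.List.dedup, PySem.Set.ofList]
  | cons c L ih =>
    have hded : PySem.List.dedup (c :: L)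
        = [c] ++ (PySem.List.dedup L).filter (fun x => !([c].contains x)) := by
      have h0 : PySem.List.dedup (c :: L) = L.foldl PySem.Set.add [c] := by
        simp [PySem.List.dedup, PySem.Set.ofList, PySem.Set.add, PySem.Set.contains]
      rw [h0, ih]
    rw [List.foldl_cons, ih, hded]
    by_cases hc : c ∈ s
    · have hadd : PySem.Set.add s c = s := by simp [PySem.Set.add, PySem.Set.contains, hc]
      rw [hadd]
      simp only [List.filter_append, List.filter_filter]
      congr 1
      have h1 : List.filter (fun x => !(s.contains x)) [c] = [] := by simp [hc]
      rw [h1]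
      simp only [List.nil_append]
      apply List.filter_congr
      intro x _
      by_cases hxc : x = c
      · subst hxc; simp [hc]
      · simp [hxc]
    · have hadd : PySem.Set.add s c = s ++ [c] := by simp [PySem.Set.add, PySem.Set.contains, hc]
      rw [hadd]
      simp only [List.filter_append, List.filter_filter, List.append_assoc]
      congr 1
      have h1 : List.filter (fun x => !(s.contains x)) [c] = [c] := by simp [hc]
      rw [h1]
      simp only [List.cons_append, List.nil_append]
      congr 1
      apply List.filter_congr
      intro x _
      by_cases hxc : x = c
      · subst hxc; simp
      · simp [hxc, Bool.and_comm]

lemma pv_dedup_nodup (L : List String) (h : L.Nodup) : PySem.List.dedup L = L := by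
  induction L with
  | nil => simp [PySem.List.dedup, PySem.Set.ofList]
  | cons c L ih =>
    rcases List.nodup_cons.mp h with ⟨hc, hL⟩
    have h0 : PySem.List.dedup (c :: L) = L.foldl PySem.Set.add [c] := by
      simp [PySem.List.dedup, PySem.Set.ofList, PySem.Set.add, PySem.Set.contains]
    rw [h0, pv_addAll, ih hL]
    have hne : ∀ a ∈ L, ¬ a = c := fun a ha e => hc (e ▸ ha)
    simpa using hne

lemma pv_dedup_filter (q : String → Bool) (L : List String) :
    PySem.List.dedup (L.filter q) = (PySem.List.dedup L).filter q := by
  induction L with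
  | nil => simp [PySem.List.dedup, PySem.Set.ofList]
  | cons c L ih =>
    have hded : ∀ (M : List String) (d : String), PySem.List.dedup (d :: M)
        = [d] ++ (PySem.List.dedup M).filter (fun x => !([d].contains x)) := by
      intro M d
      have h0 : PySem.List.dedup (d :: M) = M.foldl PySem.Set.add [d] := by
        simp [PySem.List.dedup, PySem.Set.ofList, PySem.Set.add, PySem.Set.contains]
      rw [h0, pv_addAll]
    by_cases hq : q c
    · rw [List.filter_cons_of_pos hq, hded, hded, ih]
      simp only [List.filter_append, List.filter_filter]
      congr 1
      · simp [hq]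
      · apply List.filter_congr
        intro x _
        by_cases hxc : x = c <;> simp [hxc, hq]
    · rw [List.filter_cons_of_neg hq, hded, ih]
      simp only [List.filter_append]
      have h1 : List.filter q [c] = [] := by simp [hq]
      rw [h1, List.nil_append, List.filter_filter]
      apply List.filter_congr
      intro x _
      by_cases hxc : x = c
      · subst hxc; simp [hq]
      · simp [hxc]

lemma pv_contains_dedup (L : List String) (c : String) :
    (PySem.List.dedup L).contains c = L.contains c := by
  by_cases h : c ∈ L
  · simp [h]
  · have h2 : c ∉ PySem.List.dedup L := fun hx => h ((PySem.List.mem_dedup L c).mp hx)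
    simp [h]

-- dropping incoming entries already in existing does not change the dedup of the concat
lemma pv_dedup_disc (ex inc : List String) :
    PySem.List.dedup (ex ++ inc.filter (fun c => !(ex.contains c)))
      = PySem.List.dedup (ex ++ inc) := by
  have key : ∀ t : List String, PySem.List.dedup (ex ++ t)
      = PySem.List.dedup ex ++ (PySem.List.dedup t).filter (fun c => !(ex.contains c)) := by
    intro t
    have h0 : PySem.List.dedup (ex ++ t) = t.foldl PySem.Set.add (PySem.List.dedup ex) := by
      simp [PySem.List.dedup, PySem.Set.ofList, List.foldl_append]
    rw [h0, pv_addAll]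
    congr 1
    apply List.filter_congr
    intro x _
    rw [pv_contains_dedup]
  rw [key, key, pv_dedup_filter]
  congr 1
  rw [List.filter_filter]
  apply List.filter_congr
  intro x _
  by_cases h : ex.contains x <;> simp [h]

-- ---- milestone 1: A computes pvHead ++ pvExtras ----
lemma pv_A_eq (ex inc : List String) :
    order_columns_py ex inc = pvHead ex inc ++ pvExtras ex inc := by
  show ((ex ++ inc.filter (fun c => !(ex.contains c))).foldl
      (fun acc c =>
        if PySem.Set.contains disallowedColumns c then acc
        else if !(PySem.Set.contains acc.2 c) then (acc.1 ++ [c], PySem.Set.add acc.2 c) else acc)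
      (desiredColumns.foldl (fun acc c =>
        if ex.contains c || inc.contains c then
          if !(PySem.Set.contains acc.2 c) then (acc.1 ++ [c], PySem.Set.add acc.2 c) else acc
        else acc) ([], PySem.Set.empty))).1 = pvHead ex inc ++ pvExtras ex inc
  -- loop 1 keeps (union, seen) in lockstep and computes pvHead
  have hu1 : desiredColumns.foldl (fun (acc : List String × PySem.Set String) c =>
        if ex.contains c || inc.contains c then
          if !(PySem.Set.contains acc.2 c) then (acc.1 ++ [c], PySem.Set.add acc.2 c) else acc
        else acc) ([], PySem.Set.empty)
      = (pvHead ex inc, pvHead ex inc) := by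
    rw [show (([], PySem.Set.empty) : List String × PySem.Set String)
          = (([] : List String), ([] : List String)) from rfl,
        pv_loop_pair (fun c => ex.contains c || inc.contains c) desiredColumns [],
        pv_foldl_guard, pv_addAll,
        pv_dedup_nodup _ (pv_nodup_desired.filter _)]
    simp only [List.nil_append]
    rw [show List.filter (fun c : String => ! List.contains [] c)
          (List.filter (fun c => ex.contains c || inc.contains c) desiredColumns)
        = List.filter (fun c => ex.contains c || inc.contains c) desiredColumns from
      List.filter_eq_self.mpr (fun x _ => rfl)]
    rfl
  rw [hu1]
  -- loop 2: flip the disallowed guard, then it is the same guarded Set.add fold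
  have hguard : (fun (acc : List String × PySem.Set String) c =>
        if PySem.Set.contains disallowedColumns c then acc
        else if !(PySem.Set.contains acc.2 c) then (acc.1 ++ [c], PySem.Set.add acc.2 c) else acc)
      = (fun (acc : List String × PySem.Set String) c =>
        if (!(PySem.Set.contains disallowedColumns c)) then
          (if !(PySem.Set.contains acc.2 c) then (acc.1 ++ [c], PySem.Set.add acc.2 c) else acc)
        else acc) := by
    funext acc c
    by_cases h : PySem.Set.contains disallowedColumns c <;> simp [h]
  rw [hguard,
      pv_loop_pair (fun c => !(PySem.Set.contains disallowedColumns c))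
        (ex ++ inc.filter (fun c => !(ex.contains c))) (pvHead ex inc)]
  simp only
  rw [pv_foldl_guard, pv_addAll, pv_dedup_filter, pv_dedup_disc]
  congr 1
  simp only [pvExtras, pvCand]
  apply List.filter_congr
  intro x hx
  have hxm : x ∈ ex ++ inc := (PySem.List.mem_dedup _ _).mp (List.mem_filter.mp hx).1
  have hP : pvP ex inc x = true := by
    rcases List.mem_append.mp hxm with h | h <;> simp [pvP, h]
  by_cases hd : x ∈ desiredColumns
  · have hh : x ∈ pvHead ex inc := List.mem_filter.mpr ⟨hd, hP⟩
    simp [hd, hh]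
  · have hh : x ∉ pvHead ex inc := fun hh => hd (List.mem_filter.mp hh).1
    simp [hd, hh]

-- ---- facts about enumerate ----
lemma pv_enum_cons (x : String) (t : List String) (n : Int) :
    PySem.List.enumerate (x :: t) n = (n, x) :: PySem.List.enumerate t (n + 1) := by
  simp [PySem.List.enumerate]

lemma pv_enum_map_snd (xs : List String) (n : Int) :
    (PySem.List.enumerate xs n).map Prod.snd = xs := by
  induction xs generalizing n with
  | nil => simp [PySem.List.enumerate]
  | cons x t ih => rw [pv_enum_cons]; simp [ih]

lemma pv_enum_lb (xs : List String) (n : Int) :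
    ∀ p ∈ PySem.List.enumerate xs n, n ≤ p.1 := by
  induction xs generalizing n with
  | nil => simp [PySem.List.enumerate]
  | cons x t ih =>
    rw [pv_enum_cons]
    intro p hp
    rcases List.mem_cons.mp hp with h | h
    · simp [h]
    · have := ih (n + 1) p h
      omega

lemma pv_enum_pairwise (xs : List String) (n : Int) :
    (PySem.List.enumerate xs n).Pairwise (fun a b => a.1 < b.1) := by
  induction xs generalizing n with
  | nil => simp [PySem.List.enumerate]
  | cons x t ih =>
    rw [pv_enum_cons]
    exact List.Pairwise.cons (fun p hp => by have := pv_enum_lb t (n + 1) p hp; simp; omega) (ih (n + 1))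

lemma pv_enum_mem (xs : List String) (n : Int) (j : Int) (c : String) :
    ((j, c) ∈ PySem.List.enumerate xs n) ↔ ∃ i : Nat, n + i = j ∧ xs[i]? = some c := by
  induction xs generalizing n with
  | nil => simp [PySem.List.enumerate]
  | cons x t ih =>
    rw [pv_enum_cons]
    simp only [List.mem_cons, ih, Prod.mk.injEq]
    constructor
    · rintro (⟨h1, h2⟩ | ⟨i, h1, h2⟩)
      · exact ⟨0, by simp [h1], by simp [h2]⟩
      · exact ⟨i + 1, by push_cast; omega, by simpa using h2⟩
    · rintro ⟨i, h1, h2⟩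
      cases i with
      | zero => left; constructor <;> simp_all
      | succ i =>
        right
        refine ⟨i, by push_cast at h1 ⊢; omega, by simpa using h2⟩

lemma pv_enum_mem_nodup (xs : List String) (h : xs.Nodup) (j : Int) (c : String) :
    ((j, c) ∈ PySem.List.enumerate xs 0) ↔ (c ∈ xs ∧ j = (xs.idxOf c : Int)) := by
  rw [pv_enum_mem]
  constructor
  · rintro ⟨i, h1, h2⟩
    have hi : i < xs.length := by
      by_contra hge
      rw [List.getElem?_eq_none (by omega)] at h2
      simp at h2
    have hgi : xs[i] = c := by
      have := List.getElem?_eq_getElem hi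
      rw [this] at h2
      exact Option.some.inj h2
    have hmem : c ∈ xs := hgi ▸ xs.getElem_mem hi
    have hidx : xs.idxOf c = i := by
      subst hgi
      exact h.idxOf_getElem i hi
    constructor
    · exact hmem
    · omega
  · rintro ⟨hmem, hj⟩
    have hi : xs.idxOf c < xs.length := List.idxOf_lt_length_of_mem hmem
    refine ⟨xs.idxOf c, by omega, ?_⟩
    rw [List.getElem?_eq_getElem hi, List.getElem_idxOf hi]

-- positions in a nodup list increase along the list
lemma pv_pairwise_idxOf (L : List String) (h : L.Nodup) :
    L.Pairwise (fun a b => L.idxOf a < L.idxOf b) := by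
  induction L with
  | nil => simp
  | cons c L ih =>
    rcases List.nodup_cons.mp h with ⟨hc, hL⟩
    constructor
    · intro b hb
      have hbc : ¬ c = b := fun e => hc (e ▸ hb)
      rw [List.idxOf_cons_self, List.idxOf_cons_ne _ hbc]
      omega
    · refine (ih hL).imp_of_mem ?_
      intro a b ha hb hlt
      have hca : ¬ c = a := fun e => hc (e ▸ ha)
      have hcb : ¬ c = b := fun e => hc (e ▸ hb)
      rw [List.idxOf_cons_ne _ hca, List.idxOf_cons_ne _ hcb]
      omega

lemma pv_idxOf?_mem (L : List String) (c : String) (h : c ∈ L) :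
    List.idxOf? c L = some (L.idxOf c) := by
  induction L with
  | nil => simp at h
  | cons a L ih =>
    by_cases hac : a = c
    · subst hac
      simp [List.idxOf?, List.findIdx?_cons]
    · rcases List.mem_cons.mp h with h1 | h1
      · exact absurd h1.symm hac
      · simp [List.idxOf?_cons, List.idxOf_cons_ne _ hac, hac, ih h1]

-- ---- milestone 2: B computes pvHead ++ pvExtras ----
lemma pv_B_eq (ex inc : List String) :
    order_columns_py_alt ex inc = pvHead ex inc ++ pvExtras ex inc := by
  show (PySem.List.sorted (PySem.List.enumerate (pvCand ex inc))
      (fun ic => if desiredColumns.contains ic.2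
          then (((PySem.List.index? desiredColumns ic.2).getD 0 : Nat) : Int)
          else ((desiredColumns.length : Int)) + ic.1)).map (fun ic => ic.2)
      = pvHead ex inc ++ pvExtras ex inc
  have hcand_nodup : (pvCand ex inc).Nodup := (PySem.List.nodup_dedup _).filter _
  set cand := pvCand ex inc with hcand
  set e := PySem.List.enumerate cand 0 with he
  set rank : Int × String → Int := fun ic =>
    if desiredColumns.contains ic.2
      then (((PySem.List.index? desiredColumns ic.2).getD 0 : Nat) : Int)
      else ((desiredColumns.length : Int)) + ic.1 with hrank
  set g : String → Int × String := fun c => ((cand.idxOf c : Int), c) with hg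
  set hd := (pvHead ex inc).map g with hhd
  set tl := e.filter (fun p => !(desiredColumns.contains p.2)) with htl
  -- basic membership facts
  have hheadsub : ∀ {c : String}, c ∈ pvHead ex inc → c ∈ desiredColumns :=
    fun h => (List.mem_filter.mp h).1
  have hheadcand : ∀ {c : String}, c ∈ pvHead ex inc → c ∈ cand := by
    intro c h
    rcases List.mem_filter.mp h with ⟨hD, hP⟩
    refine List.mem_filter.mpr ⟨(PySem.List.mem_dedup _ _).mpr ?_, ?_⟩
    · have hP' : c ∈ ex ∨ c ∈ inc := by
        simpa [pvP, List.contains_eq_mem] using hP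
      exact List.mem_append.mpr hP'

    · simpa using List.all_eq_true.mp pv_disjoint c hD
  have hcandP : ∀ {c : String}, c ∈ cand → pvP ex inc c = true := by
    intro c h
    have hm : c ∈ ex ++ inc := (PySem.List.mem_dedup _ _).mp (List.mem_filter.mp h).1
    rcases List.mem_append.mp hm with h1 | h1 <;> simp [pvP, h1]
  -- rank values
  have hrankD : ∀ (j : Int) (c : String), c ∈ desiredColumns →
      rank (j, c) = (desiredColumns.idxOf c : Int) := by
    intro j c hc
    have h1 : desiredColumns.contains c = true := List.contains_iff_mem.mpr hc
    rw [hrank]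
    simp only
    rw [if_pos h1]
    simp [PySem.List.index?, pv_idxOf?_mem _ _ hc]
  have hrankN : ∀ (j : Int) (c : String), c ∉ desiredColumns →
      rank (j, c) = (desiredColumns.length : Int) + j := by
    intro j c hc
    have h1 : ¬ (desiredColumns.contains c = true) := by
      simpa [List.contains_iff_mem] using hc
    rw [hrank]
    simp only
    rw [if_neg h1]
  -- nodup facts
  have hginj : Function.Injective g := by
    intro a b hab
    have := congrArg Prod.snd hab
    simpa [hg] using this
  have hnodup_hd : hd.Nodup := (pv_nodup_desired.filter _).map hginj
  have hnodup_e : e.Nodup := by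
    refine (pv_enum_pairwise cand 0).imp ?_
    intro a b hlt heq
    rw [heq] at hlt
    omega
  -- the permutation
  have h1 : hd.Perm (e.filter (fun p => desiredColumns.contains p.2)) := by
    rw [List.perm_ext_iff_of_nodup hnodup_hd (hnodup_e.filter _)]
    rintro ⟨j, c⟩
    rw [List.mem_filter]
    have hmemhd : ((j, c) ∈ hd) ↔ (c ∈ pvHead ex inc ∧ j = (cand.idxOf c : Int)) := by
      rw [hhd]
      constructor
      · intro h
        rcases List.mem_map.mp h with ⟨c', hc', hcc⟩
        have h2 : c' = c := by simpa [hg] using congrArg Prod.snd hcc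
        subst h2
        have h1 : j = (cand.idxOf c' : Int) := by
          simpa [hg] using (congrArg Prod.fst hcc).symm
        exact ⟨hc', h1⟩
      · rintro ⟨hc, rfl⟩
        exact List.mem_map.mpr ⟨c, hc, rfl⟩
    rw [hmemhd, he, pv_enum_mem_nodup cand hcand_nodup]
    constructor
    · rintro ⟨hc, rfl⟩
      exact ⟨⟨hheadcand hc, rfl⟩, List.contains_iff_mem.mpr (hheadsub hc)⟩
    · rintro ⟨⟨hc, rfl⟩, hD⟩
      refine ⟨List.mem_filter.mpr ⟨List.contains_iff_mem.mp hD, hcandP hc⟩, rfl⟩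
  have hperm : (hd ++ tl).Perm e := by
    refine List.Perm.trans (h1.append_right tl) ?_
    exact List.filter_append_perm _ e
  -- strictly increasing ranks along hd ++ tl
  have hpw : (hd ++ tl).Pairwise (fun a b => rank a < rank b) := by
    rw [List.pairwise_append]
    refine ⟨?_, ?_, ?_⟩
    · rw [hhd, List.pairwise_map]
      refine ((pv_pairwise_idxOf desiredColumns pv_nodup_desired).filter (pvP ex inc)).imp_of_mem ?_
      intro a b ha hb hlt
      have haD : a ∈ desiredColumns := hheadsub ha
      have hbD : b ∈ desiredColumns := hheadsub hb
      rw [hg]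
      simp only
      rw [hrankD _ _ haD, hrankD _ _ hbD]
      omega
    · rw [htl]
      refine ((pv_enum_pairwise cand 0).filter _).imp_of_mem ?_
      intro a b ha hb hlt
      have haD : a.2 ∉ desiredColumns := by
        simpa using (List.mem_filter.mp ha).2
      have hbD : b.2 ∉ desiredColumns := by
        simpa using (List.mem_filter.mp hb).2
      have h1 := hrankN a.1 a.2 haD
      have h2 := hrankN b.1 b.2 hbD
      rw [show ((a.1, a.2) : Int × String) = a from rfl] at h1
      rw [show ((b.1, b.2) : Int × String) = b from rfl] at h2
      rw [h1, h2]
      omega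
    · intro a ha b hb
      rcases List.mem_map.mp (hhd ▸ ha) with ⟨c, hc, rfl⟩
      have hcD : c ∈ desiredColumns := hheadsub hc
      have hidx : desiredColumns.idxOf c < desiredColumns.length :=
        List.idxOf_lt_length_of_mem hcD
      have hbmem : b ∈ e := (List.mem_filter.mp (htl ▸ hb)).1
      have hbD : b.2 ∉ desiredColumns := by
        have hb' : b ∈ List.filter (fun p => !desiredColumns.contains p.2) e := htl ▸ hb
        simpa using (List.mem_filter.mp hb').2
      have hb0 : (0 : Int) ≤ b.1 := pv_enum_lb cand 0 b (he ▸ hbmem)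
      have h1 : rank (g c) = (desiredColumns.idxOf c : Int) := by
        rw [hg]; exact hrankD _ _ hcD
      have h2 := hrankN b.1 b.2 hbD
      rw [show ((b.1, b.2) : Int × String) = b from rfl] at h2
      rw [h1, h2]
      omega
  have hsorted : PySem.List.sorted e rank = hd ++ tl :=
    PySem.List.sorted_eq_of_perm_of_pairwise_lt e (hd ++ tl) rank hperm hpw
  rw [hsorted, List.map_append]
  congr 1
  · rw [hhd, List.map_map]
    have hcomp : ((fun ic : Int × String => ic.2) ∘ fun c => ((List.idxOf c cand : Int), c)) = id := rfl
    rw [hcomp, List.map_id]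
  · rw [htl]
    have hfm := List.filter_map (f := (Prod.snd : Int × String → String))
      (p := fun c => !(desiredColumns.contains c)) (l := e)
    have : (List.map Prod.snd e).filter (fun c => !(desiredColumns.contains c)) = pvExtras ex inc := by
      rw [he, pv_enum_map_snd]
      rfl
    rw [← this, hfm]
    rfl

-- ===== VERDICT (by name: the statement is the Claim_ definition above) =====
theorem order_columns_py_spec : Claim_equal_order_columns_py := by
  intro ex inc _
  show _ = _
  rw [pv_A_eq, pv_B_eq]
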